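-- pv_equiv track=rewrite | github.com/ShevchonokOlya/SoftUni_Advanced | advanced_tasks.py | bunnies_spred
-- ===== SOURCE A (Python) =====
-- def bunnies_spred(field, current_bunnies_coordinates):
--
--     new_bunnies = set()
--     person_dead = False
--
--     spreading_bunnies = [ (-1, 0), (1, 0), (0, -1), (0, 1)  ]
--     for bunny in current_bunnies_coordinates:
--         for row, col in spreading_bunnies:
--             if 0 <= bunny[0]+row < len(field) and 0 <= bunny[1] + col < len(field[0]):
--                 new_bunnies.add((bunny[0]+row, bunny[1]+col))
--                 if field[bunny[0]+row][bunny[1]+col] == "P":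
--                     person_dead = True
--                 field[bunny[0] + row][bunny[1] + col] = "B"
--
--     return field, current_bunnies_coordinates.union(new_bunnies), person_dead
-- ===== SOURCE B (Python) =====
-- def bunnies_spred(field, current_bunnies_coordinates):
--     rows = len(field)
--     cols = len(field[0]) if field else 0
--     new_bunnies = {(r + dr, c + dc)
--                    for r, c in current_bunnies_coordinates
--                    for dr, dc in ((-1, 0), (1, 0), (0, -1), (0, 1))
--                    if 0 <= r + dr < rows and 0 <= c + dc < cols}
--     person_dead = any(cell == "P" and (i, j) in new_bunnies
--                       for i, row in enumerate(field)
--                       for j, cell in enumerate(row))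
--     out = [["B" if (i, j) in new_bunnies else cell
--             for j, cell in enumerate(row)]
--            for i, row in enumerate(field)]
--     return out, current_bunnies_coordinates | new_bunnies, person_dead
-- ===== Notes on version B (the rewrite author's own statement) =====
-- stated objective: alternative
-- what changed: A walks the bunny list and point-mutates each in-bounds neighbour while interleaving the 'P' check; B builds the neighbour set once by comprehension and then traverses the GRID, detecting 'P' by a per-cell membership test and rebuilding the whole field as a comprehension (no mutation) instead of point writes.
import Mathlib
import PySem

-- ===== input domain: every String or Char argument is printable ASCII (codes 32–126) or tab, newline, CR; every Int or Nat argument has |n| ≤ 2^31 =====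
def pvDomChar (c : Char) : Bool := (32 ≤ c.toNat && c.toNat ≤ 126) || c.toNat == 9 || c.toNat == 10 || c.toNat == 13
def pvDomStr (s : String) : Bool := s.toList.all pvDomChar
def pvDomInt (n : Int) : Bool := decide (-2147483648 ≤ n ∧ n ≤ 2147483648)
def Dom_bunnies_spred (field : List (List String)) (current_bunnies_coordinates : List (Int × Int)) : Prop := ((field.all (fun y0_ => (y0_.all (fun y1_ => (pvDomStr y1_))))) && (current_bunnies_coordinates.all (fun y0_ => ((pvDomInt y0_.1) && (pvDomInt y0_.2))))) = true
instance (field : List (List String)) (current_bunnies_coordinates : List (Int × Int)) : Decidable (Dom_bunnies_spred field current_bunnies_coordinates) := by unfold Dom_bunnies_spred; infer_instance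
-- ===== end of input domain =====

-- B replaces A's bunny-driven mutation loop by a cell-driven traversal: the neighbour set is built
-- once by a comprehension, then the GRID is scanned — 'P' is detected by a per-cell membership test
-- and the field is rebuilt as a comprehension instead of being point-mutated.  Objective: alternative.
-- NOTE: the Python A mutates `field` in place; B builds a fresh grid and does NOT mutate its
-- argument — the equivalence proved here is about the RETURN value.

-- ===== PORT A =====
def bunnies_spred (field : List (List String)) (current_bunnies_coordinates : List (Int × Int)) : List (List String) × (List (Int × Int)) × Bool :=
  let spreading_bunnies : List (Int × Int) := [(-1, 0), (1, 0), (0, -1), (0, 1)]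
  let st := current_bunnies_coordinates.foldl (fun st bunny =>
      spreading_bunnies.foldl (fun (st : List (List String) × PySem.Set (Int × Int) × Bool) d =>
        if 0 ≤ bunny.1 + d.1 ∧ bunny.1 + d.1 < (st.1.length : Int) ∧
           0 ≤ bunny.2 + d.2 ∧ bunny.2 + d.2 < ((st.1.headD []).length : Int) then
          (PySem.List.pySetD st.1 (bunny.1 + d.1)
             (PySem.List.pySetD (PySem.List.pyGetD st.1 (bunny.1 + d.1) []) (bunny.2 + d.2) "B"),
           PySem.Set.add st.2.1 (bunny.1 + d.1, bunny.2 + d.2),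
           if PySem.List.pyGetD (PySem.List.pyGetD st.1 (bunny.1 + d.1) []) (bunny.2 + d.2) "" = "P" then true
           else st.2.2)
        else st) st)
    (field, PySem.Set.empty, false)
  (st.1, PySem.Set.union current_bunnies_coordinates st.2.1, st.2.2)

-- ===== PORT B =====
def bunnies_spred_alt (field : List (List String)) (current_bunnies_coordinates : List (Int × Int)) : List (List String) × (List (Int × Int)) × Bool :=
  let rows : Int := field.length
  let cols : Int := (field.headD []).length       -- len(field[0]) if field else 0
  -- set comprehension over bunnies × offsets with the bounds guard
  let new_bunnies : PySem.Set (Int × Int) := PySem.Set.ofList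
    (current_bunnies_coordinates.flatMap (fun b =>
      (([(-1, 0), (1, 0), (0, -1), (0, 1)] : List (Int × Int)).map
          (fun d => (b.1 + d.1, b.2 + d.2))).filter
        (fun n => decide (0 ≤ n.1 ∧ n.1 < rows ∧ 0 ≤ n.2 ∧ n.2 < cols))))
  -- any(cell == 'P' and (i, j) in new_bunnies for i, row in enumerate(field) for j, cell in enumerate(row))
  let person_dead := (PySem.List.enumerate field).any (fun ir =>
      (PySem.List.enumerate ir.2).any (fun jc =>
        decide (jc.2 = "P") && new_bunnies.contains (ir.1, jc.1)))
  -- [['B' if (i, j) in new_bunnies else cell for j, cell in enumerate(row)] for i, row in enumerate(field)]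
  let out := (PySem.List.enumerate field).map (fun ir =>
      (PySem.List.enumerate ir.2).map (fun jc =>
        if new_bunnies.contains (ir.1, jc.1) then "B" else jc.2))
  (out, PySem.Set.union current_bunnies_coordinates new_bunnies, person_dead)

-- ===== PRECONDITION & SPEC =====
-- Pre_ excludes exactly the inputs where the Python A raises IndexError: a ragged field in which
-- some in-bounds-by-the-guard neighbour cell (guard uses len(field[0])) lies beyond the end of
-- its own, shorter row.
def Pre_bunnies_spred (field : List (List String)) (current_bunnies_coordinates : List (Int × Int)) : Prop :=
  ∀ b ∈ current_bunnies_coordinates,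
    ∀ n ∈ ([(b.1 - 1, b.2), (b.1 + 1, b.2), (b.1, b.2 - 1), (b.1, b.2 + 1)] : List (Int × Int)),
      (0 ≤ n.1 ∧ n.1 < (field.length : Int) ∧ 0 ≤ n.2 ∧ n.2 < ((field.headD []).length : Int)) →
      n.2 < ((field.getD n.1.toNat []).length : Int)
instance (field : List (List String)) (current_bunnies_coordinates : List (Int × Int)) : Decidable (Pre_bunnies_spred field current_bunnies_coordinates) := by unfold Pre_bunnies_spred; infer_instance

def pvWitness_bunnies_spred : List (List String) × (List (Int × Int)) :=
  ([[".", "."], [".", "P"]], [(0, 0), (1, 1)])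

def Spec_bunnies_spred (field : List (List String)) (current_bunnies_coordinates : List (Int × Int)) (out : List (List String) × (List (Int × Int)) × Bool) : Prop := out = bunnies_spred_alt field current_bunnies_coordinates
instance (field : List (List String)) (current_bunnies_coordinates : List (Int × Int)) (out : List (List String) × (List (Int × Int)) × Bool) : Decidable (Spec_bunnies_spred field current_bunnies_coordinates out) := by unfold Spec_bunnies_spred; infer_instance

-- ===== CLAIM (what is proved, stated in full; the proofs are below) =====
def Claim_equal_bunnies_spred : Prop := ∀ (field : List (List String)) (current_bunnies_coordinates : List (Int × Int)), Dom_bunnies_spred field current_bunnies_coordinates → Pre_bunnies_spred field current_bunnies_coordinates → Spec_bunnies_spred field current_bunnies_coordinates (bunnies_spred field current_bunnies_coordinates)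

-- ===== LEMMAS AND PROOFS =====

-- proof-only helpers
def pvNbrs (b : Int × Int) : List (Int × Int) :=
  [(b.1 - 1, b.2), (b.1 + 1, b.2), (b.1, b.2 - 1), (b.1, b.2 + 1)]
abbrev pvInb (field : List (List String)) (n : Int × Int) : Prop :=
  0 ≤ n.1 ∧ n.1 < (field.length : Int) ∧ 0 ≤ n.2 ∧ n.2 < ((field.headD []).length : Int)
def pvColOK (field : List (List String)) (n : Int × Int) : Prop :=
  n.2 < ((field.getD n.1.toNat []).length : Int)
def pvShape (f : List (List String)) : List Nat := f.map List.length
def pvWr (f : List (List String)) (n : Int × Int) : List (List String) :=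
  PySem.List.pySetD f n.1 (PySem.List.pySetD (PySem.List.pyGetD f n.1 []) n.2 "B")
def pvCell (f : List (List String)) (n : Int × Int) : String :=
  PySem.List.pyGetD (PySem.List.pyGetD f n.1 []) n.2 ""
def pvVisits (field : List (List String)) (l : List (Int × Int)) : List (Int × Int) :=
  l.flatMap (fun b => (pvNbrs b).filter (fun n => decide (pvInb field n)))
def pvGood (field : List (List String)) (n : Int × Int) : Prop :=
  pvInb field n ∧ pvColOK field n

theorem pvShape_length (f : List (List String)) : (pvShape f).length = f.length := by
  simp [pvShape]

theorem pvShape_headD (f : List (List String)) : (f.headD []).length = (pvShape f).headD 0 := by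
  cases f <;> simp [pvShape]

theorem pvShape_getD (f : List (List String)) (i : Nat) :
    (f.getD i []).length = (pvShape f).getD i 0 := by
  induction f generalizing i with
  | nil => simp [pvShape]
  | cons a t ih =>
    cases i with
    | zero => simp [pvShape, List.getD]
    | succ m => simp only [pvShape, List.map_cons, List.getD]; simpa [pvShape, List.getD] using ih m

theorem pvInb_congr {g f : List (List String)} (h : pvShape g = pvShape f) (n : Int × Int) :
    pvInb g n ↔ pvInb f n := by
  have h1 : g.length = f.length := by
    rw [← pvShape_length, ← pvShape_length, h]
  have h2 : (g.headD []).length = (f.headD []).length := by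
    rw [pvShape_headD, pvShape_headD, h]
  simp only [pvInb, h1, h2]

theorem pvColOK_congr {g f : List (List String)} (h : pvShape g = pvShape f) (n : Int × Int) :
    pvColOK g n ↔ pvColOK f n := by
  simp only [pvColOK]; rw [pvShape_getD, pvShape_getD, h]

theorem pvShape_wr {g : List (List String)} {n : Int × Int} (hn : pvInb g n) :
    pvShape (pvWr g n) = pvShape g := by
  obtain ⟨h0, h1, h2, h3⟩ := hn
  have hk : n.1.toNat < g.length := by omega
  rw [pvWr, PySem.List.pySetD_of_nonneg _ _ h0, PySem.List.pyGetD_eq_getElem _ _ h0 h1,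
    PySem.List.pySetD_of_nonneg _ _ h2]
  simp only [pvShape, List.map_set]
  rw [List.length_set]
  have hg : g[n.1.toNat].length = (g.map List.length)[n.1.toNat]'(by simpa using hk) := by
    rw [List.getElem_map]
  rw [hg, List.set_getElem_self]

theorem pv_getD_set {a : Type} (l : List a) (k : Nat) (x d : a) (hk : k < l.length) (j : Nat) :
    (l.set k x).getD j d = if j = k then x else l.getD j d := by
  by_cases h : j = k
  · subst h; simp [List.getD, hk]
  · simp only [List.getD, List.getElem?_set]
    rw [if_neg (by omega), if_neg h]

theorem pv_wr_getD {g : List (List String)} {n : Int × Int}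
    (h0 : 0 ≤ n.1) (h1 : n.1 < (g.length : Int)) (h2 : 0 ≤ n.2)
    (hc : n.2 < ((g.getD n.1.toNat []).length : Int)) (i j : Nat) :
    ((pvWr g n).getD i []).getD j "" = if n = ((i : Int), (j : Int)) then "B" else (g.getD i []).getD j "" := by
  have hk : n.1.toNat < g.length := by omega
  have hrow : g.getD n.1.toNat [] = g[n.1.toNat] := List.getD_eq_getElem _ _ hk
  have hm : n.2.toNat < g[n.1.toNat].length := by rw [← hrow]; omega
  rw [pvWr, PySem.List.pySetD_of_nonneg _ _ h0, PySem.List.pyGetD_eq_getElem _ _ h0 h1,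
    PySem.List.pySetD_of_nonneg _ _ h2, pv_getD_set g _ _ [] hk i]
  by_cases hik : i = n.1.toNat
  · rw [if_pos hik, pv_getD_set _ _ _ _ hm j]
    subst hik
    by_cases hjm : j = n.2.toNat
    · rw [if_pos hjm, if_pos (by rw [Prod.ext_iff]; simp; omega)]
    · rw [if_neg hjm, if_neg (by intro he; rw [Prod.ext_iff] at he; simp at he; omega), hrow]
  · rw [if_neg hik, if_neg (by intro he; rw [Prod.ext_iff] at he; simp at he; omega)]

theorem pvShape_wrL {f : List (List String)} :
    ∀ (w : List (Int × Int)) (g : List (List String)), pvShape g = pvShape f →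
    (∀ x ∈ w, pvInb f x) → pvShape (w.foldl pvWr g) = pvShape f := by
  intro w
  induction w with
  | nil => intro g h _; simpa using h
  | cons x t ih =>
    intro g hsh hw
    simp only [List.foldl_cons]
    refine ih _ ?_ (fun y hy => hw y (by simp [hy]))
    rw [pvShape_wr ((pvInb_congr hsh x).mpr (hw x (by simp)))]
    exact hsh

theorem pv_wrL_getD {f : List (List String)} :
    ∀ (w : List (Int × Int)) (g : List (List String)), pvShape g = pvShape f →
    (∀ x ∈ w, pvInb f x ∧ pvColOK f x) → ∀ (i j : Nat),
    ((w.foldl pvWr g).getD i []).getD j "" =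
      if ((i : Int), (j : Int)) ∈ w then "B" else (g.getD i []).getD j "" := by
  intro w
  induction w with
  | nil => intro g _ _ i j; simp
  | cons x t ih =>
    intro g hsh hw i j
    simp only [List.foldl_cons]
    have hx := hw x (by simp)
    have hxg : pvInb g x := (pvInb_congr hsh x).mpr hx.1
    have hcg : pvColOK g x := (pvColOK_congr hsh x).mpr hx.2
    rw [ih _ (by rw [pvShape_wr hxg]; exact hsh) (fun y hy => hw y (by simp [hy])) i j]
    obtain ⟨h0, h1, h2, h3⟩ := hxg
    rw [pv_wr_getD h0 h1 h2 hcg i j]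
    by_cases hmem : ((i : Int), (j : Int)) ∈ t
    · rw [if_pos hmem, if_pos (by simp [hmem])]
    · rw [if_neg hmem]
      by_cases hx2 : x = ((i : Int), (j : Int))
      · rw [if_pos hx2, if_pos (by simp [hx2])]
      · rw [if_neg hx2, if_neg (by simp [List.mem_cons, hmem]; exact fun h => hx2 h.symm)]

theorem pv_getD_ext {f1 f2 : List (List String)} (hsh : pvShape f1 = pvShape f2)
    (h : ∀ i j : Nat, (f1.getD i []).getD j "" = (f2.getD i []).getD j "") : f1 = f2 := by
  have hlen : f1.length = f2.length := by rw [← pvShape_length f1, ← pvShape_length f2, hsh]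
  apply List.ext_getElem hlen
  intro i hi1 hi2
  have hrl : f1[i].length = f2[i].length := by
    rw [← List.getD_eq_getElem f1 [] hi1, ← List.getD_eq_getElem f2 [] hi2,
      pvShape_getD, pvShape_getD, hsh]
  apply List.ext_getElem hrl
  intro j hj1 hj2
  have := h i j
  rwa [List.getD_eq_getElem f1 [] hi1, List.getD_eq_getElem f2 [] hi2,
    List.getD_eq_getElem _ _ hj1, List.getD_eq_getElem _ _ hj2] at this

def pvStep (st : List (List String) × PySem.Set (Int × Int) × Bool) (n : Int × Int) :
    List (List String) × PySem.Set (Int × Int) × Bool :=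
  (pvWr st.1 n, PySem.Set.add st.2.1 n, if pvCell st.1 n = "P" then true else st.2.2)

def pvCellP (field : List (List String)) (n : Int × Int) : Bool :=
  decide (pvCell field n = "P")

theorem pvCell_eq_getD {f : List (List String)} {n : Int × Int}
    (h0 : 0 ≤ n.1) (h1 : n.1 < (f.length : Int)) (h2 : 0 ≤ n.2)
    (hc : n.2 < ((f.getD n.1.toNat []).length : Int)) :
    pvCell f n = (f.getD n.1.toNat []).getD n.2.toNat "" := by
  have hk : n.1.toNat < f.length := by omega
  have hrow : f.getD n.1.toNat [] = f[n.1.toNat] := List.getD_eq_getElem _ _ hk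
  have hm : n.2.toNat < f[n.1.toNat].length := by rw [← hrow]; omega
  rw [pvCell, PySem.List.pyGetD_eq_getElem _ _ h0 h1,
    PySem.List.pyGetD_eq_getElem _ _ h2 (show n.2 < ((f[n.1.toNat]).length : Int) by rw [← hrow]; exact hc)]
  conv_rhs => rw [hrow, List.getD_eq_getElem _ _ hm]

theorem pvCell_wrL {field : List (List String)} {w : List (Int × Int)} {n : Int × Int}
    (hw : ∀ x ∈ w, pvGood field x) (hn : pvGood field n) :
    pvCell (w.foldl pvWr field) n = if n ∈ w then "B" else pvCell field n := by
  obtain ⟨⟨h0, h1, h2, h3⟩, hc⟩ := hn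
  have hsh : pvShape (w.foldl pvWr field) = pvShape field :=
    pvShape_wrL w field rfl (fun x hx => (hw x hx).1)
  have hlen : (w.foldl pvWr field).length = field.length := by
    rw [← pvShape_length, ← pvShape_length field, hsh]
  have hrl : ((w.foldl pvWr field).getD n.1.toNat []).length = ((field.getD n.1.toNat []) : List String).length := by
    rw [pvShape_getD, pvShape_getD, hsh]
  rw [pvCell_eq_getD h0 (by rw [hlen]; exact h1) h2 (by rw [hrl]; exact hc),
    pvCell_eq_getD h0 h1 h2 hc,
    pv_wrL_getD w field rfl (fun x hx => ⟨(hw x hx).1, (hw x hx).2⟩) n.1.toNat n.2.toNat]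
  have : ((n.1.toNat : Int), (n.2.toNat : Int)) = n := by
    rw [Prod.ext_iff]; constructor <;> simp <;> omega
  rw [this]

theorem pvStep_char {field : List (List String)} :
    ∀ (v w : List (Int × Int)) (s : PySem.Set (Int × Int)) (pd0 : Bool),
    (∀ x ∈ w, pvGood field x) → (∀ x ∈ v, pvGood field x) →
    v.foldl pvStep (w.foldl pvWr field, s, pd0 || w.any (pvCellP field)) =
      ((w ++ v).foldl pvWr field, v.foldl PySem.Set.add s, pd0 || (w ++ v).any (pvCellP field)) := by
  intro v
  induction v with
  | nil => intro w s pd0 _ _; simp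
  | cons n t ih =>
    intro w s pd0 hw hv
    have hn : pvGood field n := hv n (by simp)
    simp only [List.foldl_cons, pvStep]
    have hfld : pvWr (w.foldl pvWr field) n = (w ++ [n]).foldl pvWr field := by
      rw [List.foldl_append]; rfl
    have hpd : (if pvCell (w.foldl pvWr field) n = "P" then true else pd0 || w.any (pvCellP field))
        = (pd0 || (w ++ [n]).any (pvCellP field)) := by
      rw [pvCell_wrL hw hn, List.any_append]
      by_cases hmem : n ∈ w
      · rw [if_pos hmem]
        by_cases hp : pvCell field n = "P"
        · have hwany : w.any (pvCellP field) = true :=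
            List.any_eq_true.mpr ⟨n, hmem, by simp [pvCellP, hp]⟩
          simp [hwany]
        · cases pd0 <;> simp [pvCellP, hp]
      · rw [if_neg hmem]
        by_cases hp : pvCell field n = "P"
        · cases pd0 <;> simp [pvCellP, hp]
        · cases pd0 <;> simp [pvCellP, hp]
    rw [hfld, hpd, ih (w ++ [n]) (PySem.Set.add s n) pd0
      (by intro x hx; rcases List.mem_append.mp hx with h | h
          · exact hw x h
          · simp at h; subst h; exact hn)
      (fun x hx => hv x (by simp [hx]))]
    simp [List.append_assoc]

theorem pvA_inner (field : List (List String)) (bunny : Int × Int) :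
    ∀ (offs : List (Int × Int)) (st : List (List String) × PySem.Set (Int × Int) × Bool),
    pvShape st.1 = pvShape field →
    offs.foldl (fun st d =>
        if 0 ≤ bunny.1 + d.1 ∧ bunny.1 + d.1 < (st.1.length : Int) ∧
           0 ≤ bunny.2 + d.2 ∧ bunny.2 + d.2 < ((st.1.headD []).length : Int) then
          (PySem.List.pySetD st.1 (bunny.1 + d.1)
             (PySem.List.pySetD (PySem.List.pyGetD st.1 (bunny.1 + d.1) []) (bunny.2 + d.2) "B"),
           PySem.Set.add st.2.1 (bunny.1 + d.1, bunny.2 + d.2),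
           if PySem.List.pyGetD (PySem.List.pyGetD st.1 (bunny.1 + d.1) []) (bunny.2 + d.2) "" = "P" then true
           else st.2.2)
        else st) st
    = ((offs.map (fun d => (bunny.1 + d.1, bunny.2 + d.2))).filter
        (fun n => decide (pvInb field n))).foldl pvStep st := by
  intro offs
  induction offs with
  | nil => intro st _; rfl
  | cons d t ih =>
    intro st hsh
    simp only [List.foldl_cons, List.map_cons, List.filter_cons]
    have hiff : (0 ≤ bunny.1 + d.1 ∧ bunny.1 + d.1 < ((st.1.length : Nat) : Int) ∧
           0 ≤ bunny.2 + d.2 ∧ bunny.2 + d.2 < ((st.1.headD []).length : Int))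
        ↔ pvInb field (bunny.1 + d.1, bunny.2 + d.2) :=
      pvInb_congr hsh (bunny.1 + d.1, bunny.2 + d.2)
    by_cases hc : pvInb field (bunny.1 + d.1, bunny.2 + d.2)
    · rw [if_pos (hiff.mpr hc),
        if_pos (decide_eq_true hc),
        List.foldl_cons]
      have hstep : (PySem.List.pySetD st.1 (bunny.1 + d.1)
             (PySem.List.pySetD (PySem.List.pyGetD st.1 (bunny.1 + d.1) []) (bunny.2 + d.2) "B"),
           PySem.Set.add st.2.1 (bunny.1 + d.1, bunny.2 + d.2),
           if PySem.List.pyGetD (PySem.List.pyGetD st.1 (bunny.1 + d.1) []) (bunny.2 + d.2) "" = "P" then true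
           else st.2.2) = pvStep st (bunny.1 + d.1, bunny.2 + d.2) := rfl
      rw [hstep]
      exact ih _ (by rw [show (pvStep st (bunny.1 + d.1, bunny.2 + d.2)).1 = pvWr st.1 (bunny.1 + d.1, bunny.2 + d.2) from rfl,
        pvShape_wr ((pvInb_congr hsh _).mpr hc)]; exact hsh)
    · rw [if_neg (fun h => hc (hiff.mp h)),
        if_neg (fun h => hc (of_decide_eq_true h))]
      exact ih st hsh

theorem pv_map_offs (b : Int × Int) :
    ([(-1, 0), (1, 0), (0, -1), (0, 1)] : List (Int × Int)).map (fun d => (b.1 + d.1, b.2 + d.2))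
      = pvNbrs b := by
  have e1 : b.1 + -1 = b.1 - 1 := by omega
  have e2 : b.2 + -1 = b.2 - 1 := by omega
  have e3 : b.1 + 0 = b.1 := by omega
  have e4 : b.2 + 0 = b.2 := by omega
  simp [pvNbrs, e1, e2, e3, e4]

theorem pvShape_foldl_pvStep {field : List (List String)} :
    ∀ (v : List (Int × Int)) (st : List (List String) × PySem.Set (Int × Int) × Bool),
    pvShape st.1 = pvShape field → (∀ x ∈ v, pvInb field x) →
    pvShape ((v.foldl pvStep st).1) = pvShape field := by
  intro v
  induction v with
  | nil => intro st h _; exact h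
  | cons n t ih =>
    intro st h hv
    rw [List.foldl_cons]
    refine ih _ ?_ (fun x hx => hv x (by simp [hx]))
    rw [show (pvStep st n).1 = pvWr st.1 n from rfl,
      pvShape_wr ((pvInb_congr h n).mpr (hv n (by simp)))]
    exact h

theorem pvA_fold (field : List (List String)) :
    ∀ (l : List (Int × Int)) (st : List (List String) × PySem.Set (Int × Int) × Bool),
    pvShape st.1 = pvShape field →
    l.foldl (fun st bunny =>
      ([(-1, 0), (1, 0), (0, -1), (0, 1)] : List (Int × Int)).foldl (fun st d =>
        if 0 ≤ bunny.1 + d.1 ∧ bunny.1 + d.1 < (st.1.length : Int) ∧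
           0 ≤ bunny.2 + d.2 ∧ bunny.2 + d.2 < ((st.1.headD []).length : Int) then
          (PySem.List.pySetD st.1 (bunny.1 + d.1)
             (PySem.List.pySetD (PySem.List.pyGetD st.1 (bunny.1 + d.1) []) (bunny.2 + d.2) "B"),
           PySem.Set.add st.2.1 (bunny.1 + d.1, bunny.2 + d.2),
           if PySem.List.pyGetD (PySem.List.pyGetD st.1 (bunny.1 + d.1) []) (bunny.2 + d.2) "" = "P" then true
           else st.2.2)
        else st) st) st
    = (pvVisits field l).foldl pvStep st := by
  intro l
  induction l with
  | nil => intro st _; rfl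
  | cons b t ih =>
    intro st hsh
    rw [List.foldl_cons, pvA_inner field b _ st hsh, pv_map_offs b,
      show pvVisits field (b :: t) = ((pvNbrs b).filter (fun n => decide (pvInb field n))) ++ pvVisits field t from by
        simp [pvVisits],
      List.foldl_append]
    exact ih _ (pvShape_foldl_pvStep _ _ hsh
      (by intro x hx; exact of_decide_eq_true (List.mem_filter.mp hx).2))

theorem pvVisits_good {field : List (List String)} {cbc : List (Int × Int)}
    (hpre : Pre_bunnies_spred field cbc) :
    ∀ x ∈ pvVisits field cbc, pvGood field x := by
  intro x hx
  simp only [pvVisits, List.mem_flatMap, List.mem_filter] at hx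
  obtain ⟨b, hb, hxn, hdec⟩ := hx
  have hinb := of_decide_eq_true hdec
  refine ⟨hinb, ?_⟩
  exact hpre b hb x (by simpa [pvNbrs] using hxn) hinb

-- B-side: the comprehension's candidate list IS pvVisits
theorem pvB_cands (field : List (List String)) (cbc : List (Int × Int)) :
    cbc.flatMap (fun b =>
      (([(-1, 0), (1, 0), (0, -1), (0, 1)] : List (Int × Int)).map
          (fun d => (b.1 + d.1, b.2 + d.2))).filter
        (fun n => decide (0 ≤ n.1 ∧ n.1 < (field.length : Int) ∧ 0 ≤ n.2 ∧ n.2 < ((field.headD []).length : Int))))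
    = pvVisits field cbc := by
  simp only [pvVisits]
  refine List.flatMap_congr ?_
  intro b _
  rw [pv_map_offs]

theorem pvSet_contains_ofList (V : List (Int × Int)) (x : Int × Int) :
    (PySem.Set.ofList V).contains x = decide (x ∈ V) := by
  have h : x ∈ PySem.Set.ofList V ↔ x ∈ V := PySem.Set.mem_ofList V x
  by_cases hx : x ∈ V
  · simp only [decide_eq_true hx]
    unfold PySem.Set.contains
    simp [h.mpr hx]
  · have : ¬ x ∈ PySem.Set.ofList V := fun hc => hx (h.mp hc)
    simp only [decide_eq_false hx]
    unfold PySem.Set.contains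
    simp [this]

-- the grid rebuilt by the membership test P, cell by cell
theorem pvGrid_getD (field : List (List String)) (P : Int × Int → Bool) (i j : Nat) :
    (((PySem.List.enumerate field).map (fun ir =>
        (PySem.List.enumerate ir.2).map (fun jc =>
          if P (ir.1, jc.1) then "B" else jc.2))).getD i []).getD j "" =
    if i < field.length ∧ j < (field.getD i []).length ∧ P ((i : Int), (j : Int)) = true
    then "B" else (field.getD i []).getD j "" := by
  have e1 : ((PySem.List.enumerate field).map (fun ir =>
        (PySem.List.enumerate ir.2).map (fun jc =>
          if P (ir.1, jc.1) then "B" else jc.2))).getD i []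
      = (((PySem.List.enumerate field).map (fun ir =>
        (PySem.List.enumerate ir.2).map (fun jc =>
          if P (ir.1, jc.1) then "B" else jc.2)))[i]?).getD [] := List.getD_eq_getElem?_getD
  rw [e1, List.getElem?_map, PySem.List.getElem?_enumerate]
  by_cases hi : i < field.length
  · have hrow : field.getD i [] = field[i] := List.getD_eq_getElem _ _ hi
    rw [List.getElem?_eq_getElem hi]
    simp only [Option.map_some, Option.getD_some, zero_add]
    rw [List.getD_eq_getElem?_getD, List.getElem?_map, PySem.List.getElem?_enumerate, hrow]
    by_cases hj : j < field[i].length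
    · rw [List.getElem?_eq_getElem hj]
      simp only [Option.map_some, Option.getD_some, zero_add]
      by_cases hp : P ((i : Int), (j : Int)) = true
      · rw [if_pos hp, if_pos ⟨hi, hj, hp⟩]
      · rw [if_neg hp, if_neg (by intro hcon; exact hp hcon.2.2), List.getD_eq_getElem _ _ hj]
    · rw [List.getElem?_eq_none (by omega)]
      simp only [Option.map_none, Option.getD_none]
      rw [if_neg (by intro hcon; omega), List.getD_eq_getElem?_getD,
        List.getElem?_eq_none (by omega)]
      rfl
  · rw [List.getElem?_eq_none (by omega)]
    simp only [Option.map_none, Option.getD_none]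
    have e2 : field.getD i [] = ([] : List String) := by
      rw [List.getD_eq_getElem?_getD, List.getElem?_eq_none (by omega)]
      rfl
    rw [if_neg (by intro hcon; omega), e2]

theorem pvGrid_shape (field : List (List String)) (P : Int × Int → Bool) :
    pvShape ((PySem.List.enumerate field).map (fun ir =>
        (PySem.List.enumerate ir.2).map (fun jc =>
          if P (ir.1, jc.1) then "B" else jc.2))) = pvShape field := by
  simp only [pvShape]
  apply List.ext_getElem (by simp [PySem.List.length_enumerate])
  intro i hi1 hi2
  simp only [List.getElem_map]
  have hi : i < field.length := by simpa [PySem.List.length_enumerate] using hi2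
  have he : (PySem.List.enumerate field)[i]'(by simpa [PySem.List.length_enumerate] using hi)
      = ((i : Int), field[i]) := by
    rw [PySem.List.getElem_enumerate]; simp
  rw [he]
  simp [PySem.List.length_enumerate]

-- the written field equals the membership-rebuilt grid
theorem pvField_eq_grid (field : List (List String)) (V : List (Int × Int))
    (hgood : ∀ x ∈ V, pvGood field x) :
    V.foldl pvWr field = (PySem.List.enumerate field).map (fun ir =>
        (PySem.List.enumerate ir.2).map (fun jc =>
          if (PySem.Set.ofList V).contains (ir.1, jc.1) then "B" else jc.2)) := by
  apply pv_getD_ext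
  · rw [pvShape_wrL V field rfl (fun x hx => (hgood x hx).1), pvGrid_shape]
  · intro i j
    rw [pv_wrL_getD V field rfl (fun x hx => ⟨(hgood x hx).1, (hgood x hx).2⟩) i j,
      pvGrid_getD]
    by_cases hm : ((i : Int), (j : Int)) ∈ V
    · rw [if_pos hm]
      have hg := hgood _ hm
      have hi : i < field.length := by
        have := hg.1.2.1; simpa using by omega
      have hj : j < (field.getD i []).length := by
        have hc := hg.2
        simp only [pvColOK] at hc
        have : ((i : Int)).toNat = i := by omega
        rw [this] at hc
        omega
      rw [if_pos ⟨hi, hj, by rw [pvSet_contains_ofList]; exact decide_eq_true hm⟩]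
    · rw [if_neg hm, if_neg]
      intro hcon
      have := hcon.2.2
      rw [pvSet_contains_ofList] at this
      exact hm (of_decide_eq_true this)

-- the person_dead flag equals the grid-scan membership test
theorem pvDead_eq_grid (field : List (List String)) (V : List (Int × Int))
    (hgood : ∀ x ∈ V, pvGood field x) :
    V.any (pvCellP field) = (PySem.List.enumerate field).any (fun ir =>
      (PySem.List.enumerate ir.2).any (fun jc =>
        decide (jc.2 = "P") && (PySem.Set.ofList V).contains (ir.1, jc.1))) := by
  rw [Bool.eq_iff_iff]
  simp only [List.any_eq_true, PySem.List.mem_enumerate_iff, Bool.and_eq_true, decide_eq_true_eq]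
  constructor
  · rintro ⟨n, hn, hp⟩
    obtain ⟨⟨h0, h1, h2, h3⟩, hc⟩ := hgood n hn
    have hi : n.1.toNat < field.length := by omega
    simp only [pvColOK] at hc
    have hj : n.2.toNat < (field.getD n.1.toNat []).length := by omega
    have hrow : field.getD n.1.toNat [] = field[n.1.toNat] := List.getD_eq_getElem _ _ hi
    refine ⟨((n.1 : Int), field[n.1.toNat]), ⟨n.1.toNat, hi, by simp; omega⟩,
      ((n.2 : Int), field[n.1.toNat][n.2.toNat]'(by rw [← hrow]; exact hj)),
      ⟨n.2.toNat, by rw [← hrow]; exact hj, by simp; omega⟩, ?_, ?_⟩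
    · simp only [pvCellP, decide_eq_true_eq] at hp
      rw [pvCell_eq_getD h0 h1 h2 hc, hrow,
        List.getD_eq_getElem _ _ (show n.2.toNat < field[n.1.toNat].length from by rw [← hrow]; exact hj)] at hp
      exact hp
    · have : ((n.1, n.2) : Int × Int) = n := rfl
      rw [pvSet_contains_ofList]
      simpa [this] using hn
  · rintro ⟨ir, ⟨k, hk, hir⟩, jc, ⟨m, hm, hjc⟩, hp, hmem⟩
    subst hir
    simp only [zero_add] at hjc
    subst hjc
    simp only [zero_add] at hp hmem
    rw [pvSet_contains_ofList] at hmem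
    have hmemV : ((k : Int), (m : Int)) ∈ V := of_decide_eq_true hmem
    refine ⟨_, hmemV, ?_⟩
    obtain ⟨⟨h0, h1, h2, h3⟩, hc⟩ := hgood _ hmemV
    simp only [pvCellP, decide_eq_true_eq]
    rw [pvCell_eq_getD h0 h1 h2 hc]
    simp only [Int.toNat_natCast]
    rw [List.getD_eq_getElem _ _ hk, List.getD_eq_getElem _ _ hm]
    exact hp

-- ===== VERDICT (by name: the statement is the Claim_ definition above) =====
theorem bunnies_spred_spec : Claim_equal_bunnies_spred := by
  intro field cbc _hdom hpre
  unfold Spec_bunnies_spred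
  show bunnies_spred field cbc = bunnies_spred_alt field cbc
  simp only [bunnies_spred, bunnies_spred_alt]
  rw [pvA_fold field cbc (field, PySem.Set.empty, false) rfl, pvB_cands field cbc]
  have hgood : ∀ x ∈ pvVisits field cbc, pvGood field x := pvVisits_good hpre
  have hchar := pvStep_char (pvVisits field cbc) [] PySem.Set.empty false (by simp) hgood
  simp only [List.foldl_nil, List.any_nil, Bool.or_false, Bool.false_or, List.nil_append] at hchar
  rw [show (field, (PySem.Set.empty : PySem.Set (Int × Int)), false)
      = (([] : List (Int × Int)).foldl pvWr field, (PySem.Set.empty : PySem.Set (Int × Int)), false) from rfl] at *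
  rw [hchar]
  have hN : (pvVisits field cbc).foldl PySem.Set.add PySem.Set.empty = PySem.Set.ofList (pvVisits field cbc) := by
    rw [PySem.Set.ofList_eq_foldl]; rfl
  rw [hN, pvField_eq_grid field _ hgood, pvDead_eq_grid field _ hgood]
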